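-- pv_equiv track=rewrite | github.com/awestover/skyspace | posts/misc/src/cryptography/pyTests/grid_codes.py | get_new_correction_bits
-- ===== SOURCE A (Python) =====
-- def get_new_correction_bits(chunk):
-- 	rows = []
-- 	cols = []
-- 	for r in chunk:
-- 		rows.append((sum(r)-r[-1])%2)
-- 	for col in range(0, len(chunk)):
-- 		cols.append((sum([chunk_i[col] for chunk_i in chunk])-chunk[-1][col])%2)
-- 	return rows, cols
-- ===== SOURCE B (Python) =====
-- def get_new_correction_bits(chunk):
--     n = len(chunk)
--     rows = []
--     col_sums = [0] * n
--     for r in chunk: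
--         rows.append((sum(r) - r[-1]) % 2)
--         col_sums = [col_sums[col] + r[col] for col in range(n)]
--     cols = [(col_sums[col] - chunk[-1][col]) % 2 for col in range(n)]
--     return rows, cols
-- ===== Notes on version B (the rewrite author's own statement) =====
-- stated objective: alternative
-- what changed: Replaces A's per-column re-scan (a fresh comprehension summing the whole grid for each column) by a single accumulating pass over the rows that maintains running column sums alongside the row parities, then one final pass subtracting the last row.
import Mathlib
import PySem

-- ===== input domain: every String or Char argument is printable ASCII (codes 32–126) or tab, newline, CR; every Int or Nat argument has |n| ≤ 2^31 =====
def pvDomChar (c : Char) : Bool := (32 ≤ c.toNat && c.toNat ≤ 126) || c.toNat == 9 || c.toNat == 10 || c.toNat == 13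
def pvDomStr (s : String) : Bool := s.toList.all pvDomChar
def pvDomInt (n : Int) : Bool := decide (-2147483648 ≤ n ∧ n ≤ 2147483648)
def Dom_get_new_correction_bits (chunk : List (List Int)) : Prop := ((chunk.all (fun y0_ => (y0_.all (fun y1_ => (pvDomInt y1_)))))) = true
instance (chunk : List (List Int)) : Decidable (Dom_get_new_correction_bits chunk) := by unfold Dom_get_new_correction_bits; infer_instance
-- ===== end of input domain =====

-- B replaces A's per-column re-scan of the whole grid by one accumulating pass that
-- maintains running column sums alongside the row parities (objective: alternative decomposition).

-- ===== PORT A =====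
def get_new_correction_bits (chunk : List (List Int)) : List Int × List Int :=
  let rows := chunk.foldl (fun rows r =>
    rows ++ [PySem.Int.mod (r.sum - PySem.List.pyGetD r (-1) 0) 2]) []
  let cols := (PySem.List.pyRange 0 (chunk.length : Int) 1).foldl (fun cols col =>
    cols ++ [PySem.Int.mod ((chunk.map (fun ci => PySem.List.pyGetD ci col 0)).sum
      - PySem.List.pyGetD (PySem.List.pyGetD chunk (-1) []) col 0) 2]) []
  (rows, cols)

-- ===== PORT B =====
def get_new_correction_bits_alt (chunk : List (List Int)) : List Int × List Int :=
  let n := chunk.length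
  let st := chunk.foldl (fun (st : List Int × List Int) r =>
    (st.1 ++ [PySem.Int.mod (r.sum - PySem.List.pyGetD r (-1) 0) 2],
     (List.range n).map (fun (col : Nat) =>
       PySem.List.pyGetD st.2 (col : Int) 0 + PySem.List.pyGetD r (col : Int) 0)))
    ([], List.replicate n 0)
  (st.1, (List.range n).map (fun (col : Nat) =>
    PySem.Int.mod (PySem.List.pyGetD st.2 (col : Int) 0
      - PySem.List.pyGetD (PySem.List.pyGetD chunk (-1) []) (col : Int) 0) 2))

-- ===== PRECONDITION & SPEC =====
-- A raises IndexError when some row is shorter than the number of rows (incl. an empty row); Pre_ admits exactly the inputs where A returns.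
def Pre_get_new_correction_bits (chunk : List (List Int)) : Prop :=
  ∀ r ∈ chunk, chunk.length ≤ r.length
instance (chunk : List (List Int)) : Decidable (Pre_get_new_correction_bits chunk) := by
  unfold Pre_get_new_correction_bits; infer_instance
def pvWitness_get_new_correction_bits : List (List Int) := [[1, 2], [3, 4]]

def Spec_get_new_correction_bits (chunk : List (List Int)) (out : List Int × List Int) : Prop := out = get_new_correction_bits_alt chunk
instance (chunk : List (List Int)) (out : List Int × List Int) : Decidable (Spec_get_new_correction_bits chunk out) := by unfold Spec_get_new_correction_bits; infer_instance

-- ===== CLAIM (what is proved, stated in full; the proofs are below) =====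
def Claim_equal_get_new_correction_bits : Prop := ∀ (chunk : List (List Int)), Dom_get_new_correction_bits chunk → Pre_get_new_correction_bits chunk → Spec_get_new_correction_bits chunk (get_new_correction_bits chunk)

-- ===== LEMMAS AND PROOFS =====

-- B's running column sums: after folding the rows, entry col (col < n) holds
-- the starting entry plus the sum of r[col] over the rows folded so far.
theorem colsum_fold (n : Nat) (L : List (List Int)) :
    ∀ (cs : List Int), cs.length = n →
      L.foldl (fun cs r => (List.range n).map (fun (col : Nat) =>
          PySem.List.pyGetD cs (col : Int) 0 + PySem.List.pyGetD r (col : Int) 0)) cs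
      = (List.range n).map (fun (col : Nat) =>
          cs.getD col 0 + (L.map (fun r => PySem.List.pyGetD r (col : Int) 0)).sum) := by
  induction L with
  | nil =>
    intro cs hlen
    simp only [List.foldl_nil, List.map_nil, List.sum_nil, add_zero]
    apply List.ext_getElem
    · simp [hlen]
    · intro i h1 h2
      simp only [List.getElem_map, List.getElem_range]
      rw [List.getD_eq_getElem cs 0 (by omega)]
  | cons r L ih =>
    intro cs hlen
    simp only [List.foldl_cons]
    rw [ih _ (by simp)]
    apply List.map_congr_left
    intro col hcol
    have hc : col < n := List.mem_range.mp hcol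
    rw [PySem.List.getD_map_range _ _ _ _ hc]
    simp only [List.map_cons, List.sum_cons, PySem.List.pyGetD_natCast]
    ring

theorem get_new_correction_bits_eq (chunk : List (List Int)) :
    get_new_correction_bits chunk = get_new_correction_bits_alt chunk := by
  simp only [get_new_correction_bits, get_new_correction_bits_alt]
  rw [PySem.List.foldl_prod_mk
    (fun s r => s ++ [PySem.Int.mod (r.sum - PySem.List.pyGetD r (-1) 0) 2])
    (fun s r => (List.range chunk.length).map (fun (col : Nat) =>
      PySem.List.pyGetD s (col : Int) 0 + PySem.List.pyGetD r (col : Int) 0))]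
  refine Prod.ext rfl ?_
  simp only []
  rw [colsum_fold chunk.length chunk (List.replicate chunk.length 0) (by simp),
      PySem.List.pyRange_zero_natCast,
      PySem.List.foldl_append_singleton_eq_map, List.map_map, List.nil_append]
  apply List.map_congr_left
  intro col hcol
  have hc : col < chunk.length := List.mem_range.mp hcol
  simp only [Function.comp]
  simp only [PySem.List.pyGetD_natCast]
  rw [PySem.List.getD_map_range _ _ _ _ hc, List.getD_replicate _ hc, zero_add]

-- ===== VERDICT (by name: the statement is the Claim_ definition above) =====
theorem get_new_correction_bits_spec : Claim_equal_get_new_correction_bits := by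
  intro chunk _hdom _hpre
  unfold Spec_get_new_correction_bits
  exact get_new_correction_bits_eq chunk
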